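-- pv_equiv track=rewrite | github.com/BaoCaiH/Daily_Coding_Problem | Python/2019_07_15_Problem_181_Least_Palindromes_Split.py | min_split
-- ===== SOURCE A (Python) =====
-- def is_palindrome(string):
--     """Check if the string is palindrome."""
--     for i in range(len(string) // 2 + len(string) % 2):
--         if string[i] != string[-(i+1)]:
--             return False
--     return True
--
-- def longest_palindrome(string):
--     """Find the longest palindrome starting from the beginning."""
--     palindromes = []
--     for i in range(len(string)):
--         if is_palindrome(string[:i+1]):
--             palindromes.append(string[:i+1])
--     max_length = max([(lambda x: len(x))(s) for s in palindromes])
--     return string[:max_length]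
--
-- def min_split(string):
--     """Split the string into as few palindromes as possible."""
--     s_lst = []
--     n = 0
--     while len(string) > 0 and n < 5:
--         s_lst.append(longest_palindrome(string))
--         string = string[len(s_lst[-1]):]
--         n += 1
--     return s_lst
-- ===== SOURCE B (Python) =====
-- def min_split(string):
--     """Split the string into as few palindromes as possible (at most 5 pieces).
--
--     Instead of testing every prefix and taking the max, scan prefix lengths
--     from the longest downward and stop at the first palindromic one, using a
--     whole-slice reverse comparison instead of a character-by-character check.
--     """
--     parts = []
--     s = string
--     while s and len(parts) < 5:
--         k = len(s)
--         while s[:k] != s[:k][::-1]: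
--             k -= 1
--         parts.append(s[:k])
--         s = s[k:]
--     return parts
-- ===== Notes on version B (the rewrite author's own statement) =====
-- stated objective: alternative
-- what changed: A tests every prefix for palindromicity, collects all palindromic prefixes and takes the max length; B scans prefix lengths from the longest downward and stops at the first prefix equal to its reverse, never building the candidate list.
import Mathlib
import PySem

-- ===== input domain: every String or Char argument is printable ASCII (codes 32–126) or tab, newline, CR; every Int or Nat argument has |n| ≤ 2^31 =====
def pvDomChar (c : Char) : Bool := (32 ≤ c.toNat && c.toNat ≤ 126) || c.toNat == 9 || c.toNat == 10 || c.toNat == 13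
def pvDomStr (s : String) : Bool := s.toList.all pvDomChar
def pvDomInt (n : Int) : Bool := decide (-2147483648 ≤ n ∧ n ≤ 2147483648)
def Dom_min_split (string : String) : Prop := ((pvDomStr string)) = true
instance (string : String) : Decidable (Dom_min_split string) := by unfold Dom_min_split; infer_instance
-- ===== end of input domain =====

-- B replaces A's collect-all-palindromic-prefixes-then-take-max step by a downward scan
-- that stops at the first prefix equal to its reverse (alternative decomposition).

-- ===== PORT A =====
-- is_palindrome: half-length character loop with early exit
def pvIsPalA (s : List Char) : Bool :=
  (PySem.List.pyRange 0
      (PySem.Int.floordiv (PySem.List.len s) 2 + PySem.Int.mod (PySem.List.len s) 2) 1).all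
    (fun i => PySem.List.pyGet? s i == PySem.List.pyGet? s (-(i + 1)))

-- longest_palindrome: collect all palindromic prefixes, take the max length.
-- (.getD 0 stands where Python's max([]) would raise ValueError; that is unreachable from
--  min_split, which only calls this on a nonempty string.)
def pvLongestPalA (s : List Char) : List Char :=
  let pals := (PySem.List.pyRange 0 (PySem.List.len s) 1).foldl
      (fun acc i =>
        if pvIsPalA (PySem.List.slice s none (some (i + 1))) then
          acc ++ [PySem.List.slice s none (some (i + 1))]
        else acc) []
  let maxLength := (PySem.List.max? (pals.map (fun p => PySem.List.len p)) (fun x => x)).getD 0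
  PySem.List.slice s none (some maxLength)

-- while len(string) > 0 and n < 5, n starting at 0: fuel = 5 - n
def pvGoA : List Char → List (List Char) → Nat → List (List Char)
  | _, acc, 0 => acc
  | s, acc, fuel + 1 =>
    if s.length > 0 then
      let p := pvLongestPalA s
      pvGoA (PySem.List.slice s (some (PySem.List.len p)) none) (acc ++ [p]) fuel
    else acc

def min_split (string : String) : List String :=
  (pvGoA string.toList [] 5).map (fun p => String.ofList p)

-- ===== PORT B =====
-- inner while of Source B: k descends from len(s) to the first k with s[:k] == s[:k][::-1]
def pvLpLenB (s : List Char) : Nat → Nat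
  | 0 => 0
  | k + 1 => if s.take (k + 1) = (s.take (k + 1)).reverse then k + 1 else pvLpLenB s k

-- while s and len(parts) < 5: fuel = 5 - len(parts)
def pvGoB : List Char → List (List Char) → Nat → List (List Char)
  | _, parts, 0 => parts
  | s, parts, fuel + 1 =>
    if s ≠ [] then
      let k := pvLpLenB s s.length
      pvGoB (s.drop k) (parts ++ [s.take k]) fuel
    else parts

def min_split_alt (string : String) : List String :=
  (pvGoB string.toList [] 5).map (fun p => String.ofList p)

-- ===== PRECONDITION & SPEC =====
def Spec_min_split (string : String) (out : List String) : Prop := out = min_split_alt string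
instance (string : String) (out : List String) : Decidable (Spec_min_split string out) := by unfold Spec_min_split; infer_instance

-- ===== CLAIM (what is proved, stated in full; the proofs are below) =====
def Claim_equal_min_split : Prop := ∀ (string : String), Dom_min_split string → Spec_min_split string (min_split string)

-- ===== LEMMAS AND PROOFS =====

-- A's half-length character check decides full palindromicity.
theorem pvIsPalA_eq (s : List Char) : pvIsPalA s = decide (s = s.reverse) := by
  have hrange : PySem.List.pyRange 0 (PySem.Int.floordiv (PySem.List.len s) 2 + PySem.Int.mod (PySem.List.len s) 2) 1 = (List.range (s.length/2 + s.length%2)).map (fun k : Nat => (k : Int)) := by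
    have h1 : PySem.Int.floordiv (PySem.List.len s) 2 + PySem.Int.mod (PySem.List.len s) 2 = ((s.length/2 + s.length%2 : Nat) : Int) := by
      simp only [PySem.List.len_eq, PySem.Int.floordiv_eq_ediv_of_pos (by omega : (0:Int) < 2),
        PySem.Int.mod_eq_emod_of_pos (by omega : (0:Int) < 2)]
      omega
    rw [h1, PySem.List.pyRange_zero_natCast]
  unfold pvIsPalA
  rw [hrange, List.all_map]
  rcases Bool.eq_false_or_eq_true (decide (s = s.reverse)) with hd | hd <;> rw [hd]
  · -- s is a palindrome: every half-position check passes
    rw [decide_eq_true_eq] at hd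
    rw [List.all_eq_true]
    intro k hk
    rw [List.mem_range] at hk
    simp only [Function.comp]
    rw [show (-((k:Int)+1)) = -(((k+1 : Nat)) : Int) by push_cast; ring,
      PySem.List.pyGet?_neg_natCast s (k+1) (by omega) (by omega)]
    simp only [PySem.List.pyGet?_natCast, beq_iff_eq]
    conv_lhs => rw [hd]
    rw [List.getElem?_reverse (by omega)]
    congr 1
    omega
  · -- s is not a palindrome: some half-position check fails
    rw [decide_eq_false_iff_not] at hd
    by_contra hall
    apply hd
    rw [Bool.not_eq_false, List.all_eq_true] at hall
    have key : ∀ k, k < s.length/2 + s.length%2 → s[k]? = s[s.length - 1 - k]? := by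
      intro k hk
      have h2 := hall k (List.mem_range.mpr hk)
      simp only [Function.comp] at h2
      rw [show (-((k:Int)+1)) = -(((k+1 : Nat)) : Int) by push_cast; ring] at h2
      rw [PySem.List.pyGet?_neg_natCast s (k+1) (by omega) (by omega)] at h2
      rw [show s.length - (k+1) = s.length - 1 - k by omega] at h2
      simpa using h2
    apply List.ext_getElem?
    intro i
    by_cases hi : i < s.length
    · rw [List.getElem?_reverse hi]
      by_cases h2 : i < s.length/2 + s.length%2
      · exact key i h2
      · have hj : s.length - 1 - i < s.length/2 + s.length%2 := by omega
        have h3 := key _ hj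
        rw [show s.length - 1 - (s.length - 1 - i) = i by omega] at h3
        exact h3.symm
    · rw [List.getElem?_eq_none (by omega), List.getElem?_eq_none (by simp; omega)]

-- B's inner loop is Nat.findGreatest of "prefix k is a palindrome".
theorem pvLpLenB_eq (s : List Char) (m : Nat) :
    pvLpLenB s m = Nat.findGreatest (fun k => s.take k = (s.take k).reverse) m := by
  induction m with
  | zero => rfl
  | succ k ih => rw [pvLpLenB, Nat.findGreatest_succ, ih]

theorem max?_append_singleton (l : List Int) (x m : Int)
    (h : PySem.List.max? l (fun y => y) = some m) :
    PySem.List.max? (l ++ [x]) (fun y => y) = some (max m x) := by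
  cases l with
  | nil => simp [PySem.List.max?] at h
  | cons a t =>
    rw [PySem.List.max?_id_cons] at h
    rw [List.cons_append, PySem.List.max?_id_cons, List.foldl_append]
    simp_all

-- the max length A extracts from its candidate list is the greatest palindromic-prefix length
theorem max?_filtered (s : List Char) (n : Nat) (hn : 1 ≤ n) :
    PySem.List.max?
      (((List.range n).filter (fun k => decide (s.take (k+1) = (s.take (k+1)).reverse))).map
        (fun k => (((k+1 : Nat)) : Int))) (fun y => y)
      = some ((Nat.findGreatest (fun k => s.take k = (s.take k).reverse) n : Nat) : Int) := by
  induction n with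
  | zero => omega
  | succ n ih =>
    have hq1 : s.take 1 = (s.take 1).reverse := by cases s <;> simp
    rcases Nat.eq_or_lt_of_le hn with h1 | h1
    · -- n + 1 = 1
      have hn0 : n = 0 := by omega
      subst hn0
      rw [show List.range 1 = [0] from rfl, List.filter_cons,
        if_pos (decide_eq_true hq1), List.filter_nil, List.map_cons, List.map_nil,
        PySem.List.max?_id_cons, Nat.findGreatest_succ, if_pos hq1]
      rfl
    · have hn' : 1 ≤ n := by omega
      rw [List.range_succ, List.filter_append, List.map_append,
        show List.filter (fun k => decide (s.take (k+1) = (s.take (k+1)).reverse)) [n]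
          = if s.take (n+1) = (s.take (n+1)).reverse then [n] else [] from by
            rw [List.filter_cons, List.filter_nil]
            by_cases h : s.take (n+1) = (s.take (n+1)).reverse
            · rw [if_pos (decide_eq_true h), if_pos h]
            · rw [if_neg (by simp [h]), if_neg h]]
      by_cases hq : s.take (n+1) = (s.take (n+1)).reverse
      · rw [if_pos hq, List.map_cons, List.map_nil,
          max?_append_singleton _ _ _ (ih hn'),
          Nat.findGreatest_succ, if_pos hq]
        congr 1
        have hle := Nat.findGreatest_le (P := fun k => s.take k = (s.take k).reverse) (n := n)
        omega
      · rw [if_neg hq, List.map_nil, List.append_nil, ih hn',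
          Nat.findGreatest_succ, if_neg hq]

-- A's longest_palindrome equals B's take-of-greatest on nonempty input.
theorem longestPal_eq (s : List Char) (hs : s ≠ []) :
    pvLongestPalA s = s.take (pvLpLenB s s.length) := by
  have hn : 1 ≤ s.length := List.length_pos_of_ne_nil hs
  unfold pvLongestPalA
  rw [PySem.List.len_eq, PySem.List.pyRange_zero_natCast, List.foldl_map]
  simp only [show ∀ k : Nat, ((k:Int)+1) = (((k+1 : Nat)) : Int) from fun k => by push_cast; ring,
    PySem.List.slice_to_natCast, pvIsPalA_eq]
  rw [PySem.List.foldl_append_if (fun k => decide (s.take (k+1) = (s.take (k+1)).reverse))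
        (fun k => s.take (k+1)) (List.range s.length) []]
  simp only [List.nil_append, List.map_map, Function.comp_def, PySem.List.len_eq]
  rw [List.map_congr_left (l := (List.range s.length).filter
        (fun k => decide (s.take (k+1) = (s.take (k+1)).reverse)))
      (f := fun k => ((s.take (k+1)).length : Int)) (g := fun k => (((k+1:Nat)) : Int))
      (by intro k hk
          have := List.mem_range.mp (List.mem_of_mem_filter hk)
          simp [List.length_take]
          omega)]
  rw [max?_filtered s s.length hn, Option.getD_some, PySem.List.slice_to_natCast,
    pvLpLenB_eq]

theorem go_eq (fuel : Nat) : ∀ (s : List Char) (acc : List (List Char)),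
    pvGoA s acc fuel = pvGoB s acc fuel := by
  induction fuel with
  | zero => intro s acc; rfl
  | succ fuel ih =>
    intro s acc
    rw [pvGoA, pvGoB]
    by_cases hs : s = []
    · subst hs; simp
    · have hlen : s.length > 0 := List.length_pos_of_ne_nil hs
      rw [if_pos hlen, if_pos hs]
      have hm : pvLpLenB s s.length ≤ s.length := by
        rw [pvLpLenB_eq]; exact Nat.findGreatest_le _
      simp only [longestPal_eq s hs, PySem.List.len_eq, List.length_take,
        PySem.List.slice_from_natCast]
      rw [show min (pvLpLenB s s.length) s.length = pvLpLenB s s.length from by omega]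
      exact ih _ _

-- ===== VERDICT (by name: the statement is the Claim_ definition above) =====
theorem min_split_spec : Claim_equal_min_split := by
  intro string _
  unfold Spec_min_split min_split min_split_alt
  rw [go_eq]
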